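-- pv_equiv track=rewrite | github.com/JoaoZati/calculadora_idade | calculadora_função.py | validate_date
-- ===== SOURCE A (Python) =====
-- def validate_date(day, month, year):
--     if day not in (range(1, 32)) or month not in range(1, 13):
--         return False
--
--     leap_year = False
--     if ((year % 4 == 0) and not (year % 100 == 0)) or (year % 400 == 0):
--         leap_year = True
--
--     last_day_list = [31, 28, 31, 30, 31, 30, 31, 31, 30, 31, 30, 31]
--     if leap_year:
--         last_day_list[1] = 29
--
--     for last_day in last_day_list:
--         if day > last_day:
--             return False
--
--     return True
-- ===== SOURCE B (Python) =====
-- def validate_date(day, month, year):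
--     if month not in range(1, 13):
--         return False
--     leap = (year % 4 == 0 and year % 100 != 0) or year % 400 == 0
--     month_lengths = [31, 29 if leap else 28, 31, 30, 31, 30, 31, 31, 30, 31, 30, 31]
--     return 1 <= day <= month_lengths[month - 1]
-- ===== Notes on version B (the rewrite author's own statement) =====
-- stated objective: simpler
-- what changed: B validates day against the length of the GIVEN month by direct index lookup instead of A's 12-iteration scan that compares day against every month's length.
-- intended difference: For in-range dates whose day exceeds 28 (or 29 in a leap year) but fits the given month (e.g. 31 Jan), A returns False because its loop compares day against every month's length including February's; B returns True, which is the intended date validation. — e.g. on validate_date(31, 1, 2021): A returns false, B returns true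
import Mathlib
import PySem

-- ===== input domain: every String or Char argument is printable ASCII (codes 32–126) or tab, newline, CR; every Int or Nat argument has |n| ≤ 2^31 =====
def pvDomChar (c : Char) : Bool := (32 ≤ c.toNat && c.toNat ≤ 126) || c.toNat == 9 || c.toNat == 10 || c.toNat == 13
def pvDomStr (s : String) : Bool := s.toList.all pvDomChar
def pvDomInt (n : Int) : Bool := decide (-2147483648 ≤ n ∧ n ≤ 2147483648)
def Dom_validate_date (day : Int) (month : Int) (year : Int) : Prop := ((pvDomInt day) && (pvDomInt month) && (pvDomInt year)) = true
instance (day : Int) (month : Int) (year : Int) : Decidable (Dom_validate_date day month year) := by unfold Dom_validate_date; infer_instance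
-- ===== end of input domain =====

-- B checks the day against the given month's length by a direct lookup (simpler); A's
-- month-independent scan over all twelve lengths differs on the inputs described at D_.

-- ===== PORT A =====
-- the `for last_day in last_day_list: if day > last_day: return False` loop, early return and all
def pvCheckDays (day : Int) : List Int → Bool
  | [] => true
  | d :: rest => if day > d then false else pvCheckDays day rest

def validate_date (day : Int) (month : Int) (year : Int) : Bool :=
  if ¬ (1 ≤ day ∧ day < 32) ∨ ¬ (1 ≤ month ∧ month < 13) then false
  else
    let leap_year :=
      if ((PySem.Int.mod year 4 = 0) ∧ ¬ (PySem.Int.mod year 100 = 0)) ∨ (PySem.Int.mod year 400 = 0) then true else false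
    let last_day_list : List Int := [31, 28, 31, 30, 31, 30, 31, 31, 30, 31, 30, 31]
    let last_day_list := if leap_year then last_day_list.set 1 29 else last_day_list
    pvCheckDays day last_day_list

-- ===== PORT B =====
def validate_date_alt (day : Int) (month : Int) (year : Int) : Bool :=
  if ¬ (1 ≤ month ∧ month < 13) then false
  else
    let leap := decide (((PySem.Int.mod year 4 = 0) ∧ ¬ (PySem.Int.mod year 100 = 0)) ∨ (PySem.Int.mod year 400 = 0))
    let month_lengths : List Int := [31, if leap then 29 else 28, 31, 30, 31, 30, 31, 31, 30, 31, 30, 31]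
    match PySem.List.pyGet? month_lengths (month - 1) with
    | some L => decide (1 ≤ day ∧ day ≤ L)
    | none => false   -- unreachable here: 0 ≤ month - 1 < 12

-- ===== PRECONDITION & SPEC =====
-- For in-range dates whose day exceeds 28 (or 29 in a leap year) but fits the given month
-- (e.g. 31 Jan), A returns False because its loop compares day against every month's length
-- including February's; B returns True, which is the intended date validation.
def D_validate_date (day : Int) (month : Int) (year : Int) : Prop :=
  1 ≤ month ∧ month ≤ 12 ∧ month ≠ 2 ∧
  (if ((year % 4 = 0) ∧ ¬ (year % 100 = 0)) ∨ (year % 400 = 0) then (29:Int) else 28) < day ∧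
  day ≤ 30 + (month + month / 8) % 2
instance (day : Int) (month : Int) (year : Int) : Decidable (D_validate_date day month year) := by
  unfold D_validate_date; infer_instance

def Spec_validate_date (day : Int) (month : Int) (year : Int) (out : Bool) : Prop :=
  ¬ D_validate_date day month year → out = validate_date_alt day month year
instance (day : Int) (month : Int) (year : Int) (out : Bool) : Decidable (Spec_validate_date day month year out) := by unfold Spec_validate_date; infer_instance

def pvDiffWitness_validate_date : Int × Int × Int := (31, 1, 2021)
def pvDiffWitnessOut_validate_date : Bool × Bool := (false, true)

-- ===== CLAIM (what is proved, stated in full; the proofs are below) =====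
def Claim_unchanged_validate_date : Prop := ∀ (day : Int) (month : Int) (year : Int), Dom_validate_date day month year → Spec_validate_date day month year (validate_date day month year)
def Claim_changed_validate_date : Prop := Dom_validate_date (pvDiffWitness_validate_date.1) (pvDiffWitness_validate_date.2.1) (pvDiffWitness_validate_date.2.2) ∧ D_validate_date (pvDiffWitness_validate_date.1) (pvDiffWitness_validate_date.2.1) (pvDiffWitness_validate_date.2.2) ∧ validate_date (pvDiffWitness_validate_date.1) (pvDiffWitness_validate_date.2.1) (pvDiffWitness_validate_date.2.2) = pvDiffWitnessOut_validate_date.1 ∧ validate_date_alt (pvDiffWitness_validate_date.1) (pvDiffWitness_validate_date.2.1) (pvDiffWitness_validate_date.2.2) = pvDiffWitnessOut_validate_date.2 ∧ pvDiffWitnessOut_validate_date.1 ≠ pvDiffWitnessOut_validate_date.2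
def Claim_exact_validate_date : Prop := ∀ (day : Int) (month : Int) (year : Int), Dom_validate_date day month year → D_validate_date day month year → validate_date day month year ≠ validate_date_alt day month year

-- ===== LEMMAS AND PROOFS =====

theorem pvChk28 (day : Int) :
    pvCheckDays day [31, 28, 31, 30, 31, 30, 31, 31, 30, 31, 30, 31] = decide (day ≤ 28) := by
  simp only [pvCheckDays]
  split_ifs <;> simp <;> omega

theorem pvChk29 (day : Int) :
    pvCheckDays day [31, 29, 31, 30, 31, 30, 31, 31, 30, 31, 30, 31] = decide (day ≤ 29) := by
  simp only [pvCheckDays]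
  split_ifs <;> simp <;> omega

theorem pvAchar (day month year : Int) :
    validate_date day month year =
      decide ((1 ≤ day ∧ day < 32) ∧ (1 ≤ month ∧ month < 13) ∧
        day ≤ (if ((year % 4 = 0) ∧ ¬ (year % 100 = 0)) ∨ (year % 400 = 0) then (29:Int) else 28)) := by
  unfold validate_date
  rw [PySem.Int.mod_eq_emod_of_pos (a := year) (b := 4) (by norm_num),
      PySem.Int.mod_eq_emod_of_pos (a := year) (b := 100) (by norm_num),
      PySem.Int.mod_eq_emod_of_pos (a := year) (b := 400) (by norm_num)]
  by_cases hP : ((year % 4 = 0) ∧ ¬ (year % 100 = 0)) ∨ (year % 400 = 0) <;>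
    simp only [hP, decide_true, decide_false, Bool.false_eq_true, eq_self_iff_true,
      if_true, if_false, iff_true, iff_false, List.set, pvChk28, pvChk29] <;>
    (split_ifs with h <;> rw [Bool.eq_iff_iff] <;> simp <;> omega)

theorem pvBchar (day month year : Int) :
    validate_date_alt day month year =
      decide ((1 ≤ month ∧ month < 13) ∧ 1 ≤ day ∧
        day ≤ (if month = 2 then (if ((year % 4 = 0) ∧ ¬ (year % 100 = 0)) ∨ (year % 400 = 0) then (29:Int) else 28)
               else if month = 4 ∨ month = 6 ∨ month = 9 ∨ month = 11 then (30:Int) else 31)) := by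
  unfold validate_date_alt
  rw [PySem.Int.mod_eq_emod_of_pos (a := year) (b := 4) (by norm_num),
      PySem.Int.mod_eq_emod_of_pos (a := year) (b := 100) (by norm_num),
      PySem.Int.mod_eq_emod_of_pos (a := year) (b := 400) (by norm_num)]
  by_cases hm : 1 ≤ month ∧ month < 13
  · obtain ⟨h1, h2⟩ := hm
    by_cases hP : ((year % 4 = 0) ∧ ¬ (year % 100 = 0)) ∨ (year % 400 = 0) <;>
      (interval_cases month <;>
        simp [hP, PySem.List.pyGet?, PySem.List.pyIdx?, decide_eq_decide] <;> omega)
  · simp [hm]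

-- ===== VERDICT =====
theorem validate_date_spec : Claim_unchanged_validate_date := by
  intro day month year _
  unfold Spec_validate_date D_validate_date
  intro hD
  rw [pvAchar, pvBchar, decide_eq_decide]
  by_cases hm : 1 ≤ month ∧ month < 13
  · obtain ⟨h1, h2⟩ := hm
    by_cases hP : ((year % 4 = 0) ∧ ¬ (year % 100 = 0)) ∨ (year % 400 = 0) <;>
      (interval_cases month <;> simp [hP] at hD ⊢ <;> omega)
  · constructor
    · intro h; exact absurd h.2.1 hm
    · intro h; exact absurd h.1 hm

theorem validate_date_changed : Claim_changed_validate_date := by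
  unfold Claim_changed_validate_date; decide

theorem validate_date_tight : Claim_exact_validate_date := by
  intro day month year _ hD
  unfold D_validate_date at hD
  rw [pvAchar, pvBchar, ne_eq, decide_eq_decide]
  obtain ⟨h1, h2, h3, h4, h5⟩ := hD
  by_cases hP : ((year % 4 = 0) ∧ ¬ (year % 100 = 0)) ∨ (year % 400 = 0) <;>
    (interval_cases month <;> simp_all [hP] <;> omega)
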